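-- pv_equiv track=rewrite | github.com/aktandev/neobis_taks | katas/Max sum between two negatives.py | max_sum_between_two_negatives
-- ===== SOURCE A (Python) =====
-- def max_sum_between_two_negatives(arr):
--     current_sum = 0
--     seen_negative = False
--     results = [-1]
--     for element in arr:
--         if element > 0 and seen_negative:
--             current_sum += element
--         if element < 0 and seen_negative:
--             results.append(current_sum)
--             current_sum = 0
--         if element < 0 and not seen_negative:
--             seen_negative = True
--     return max(results)
-- ===== SOURCE B (Python) =====
-- def max_sum_between_two_negatives(arr):
--     negs = [i for i, x in enumerate(arr) if x < 0]
--     if len(negs) < 2: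
--         return -1
--     return max(sum(x for x in arr[i + 1:j] if x > 0) for i, j in zip(negs, negs[1:]))
-- ===== Notes on version B (the rewrite author's own statement) =====
-- stated objective: alternative
-- what changed: B is staged: it first collects the indices of all negatives, returns -1 if there are fewer than two, and otherwise maps a slice-based positive-sum over consecutive index pairs and takes the max - instead of A's single stateful pass with a seen-negative flag, a running sum and a results list seeded with -1.
import Mathlib
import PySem

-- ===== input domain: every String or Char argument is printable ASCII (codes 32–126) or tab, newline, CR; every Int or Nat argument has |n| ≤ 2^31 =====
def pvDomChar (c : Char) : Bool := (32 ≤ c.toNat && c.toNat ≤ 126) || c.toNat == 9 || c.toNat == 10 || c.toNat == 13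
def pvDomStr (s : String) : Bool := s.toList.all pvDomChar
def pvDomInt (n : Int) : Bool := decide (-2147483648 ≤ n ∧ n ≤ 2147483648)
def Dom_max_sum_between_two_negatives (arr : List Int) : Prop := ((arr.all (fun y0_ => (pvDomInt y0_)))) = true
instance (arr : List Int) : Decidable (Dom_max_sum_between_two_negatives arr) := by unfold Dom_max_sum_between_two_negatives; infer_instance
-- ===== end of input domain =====

-- B replaces A's single stateful flag-pass by a staged computation: collect negative indices, then max over slice-sums of consecutive pairs; same return value everywhere.
-- ===== PORT A =====
def stepA (st : Int × Bool × List Int) (element : Int) : Int × Bool × List Int :=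
  let cs := if element > 0 && st.2.1 then st.1 + element else st.1
  let rs := if element < 0 && st.2.1 then st.2.2 ++ [cs] else st.2.2
  let cs' := if element < 0 && st.2.1 then 0 else cs
  let seen := if element < 0 && !st.2.1 then true else st.2.1
  (cs', seen, rs)

def max_sum_between_two_negatives (arr : List Int) : Int :=
  let st := arr.foldl stepA (0, false, [-1])
  (PySem.List.max? st.2.2 (fun y => y)).getD 0  -- results is never empty (starts [-1]), so Python's max never raises

-- ===== PORT B =====
-- sum(x for x in l if x > 0)
def possum (l : List Int) : Int := (l.filter (fun x => 0 < x)).sum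

-- sum of positives in arr[i+1:j]
def blockSum (arr : List Int) (i j : Int) : Int :=
  possum (PySem.List.slice arr (some (i + 1)) (some j))

def max_sum_between_two_negatives_alt (arr : List Int) : Int :=
  let negs := ((PySem.List.enumerate arr).filter (fun p => p.2 < 0)).map (fun p => p.1)
  if negs.length < 2 then -1
  else (PySem.List.max? ((negs.zip negs.tail).map (fun p => blockSum arr p.1 p.2))
          (fun y => y)).getD 0  -- ≥ 2 negatives, so the list of pairs is nonempty and Python's max never raises

-- ===== PRECONDITION & SPEC =====
def Spec_max_sum_between_two_negatives (arr : List Int) (out : Int) : Prop := out = max_sum_between_two_negatives_alt arr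
instance (arr : List Int) (out : Int) : Decidable (Spec_max_sum_between_two_negatives arr out) := by unfold Spec_max_sum_between_two_negatives; infer_instance

-- ===== CLAIM (what is proved, stated in full; the proofs are below) =====
def Claim_equal_max_sum_between_two_negatives : Prop := ∀ (arr : List Int), Dom_max_sum_between_two_negatives arr → Spec_max_sum_between_two_negatives arr (max_sum_between_two_negatives arr)

-- ===== LEMMAS AND PROOFS =====

-- Proof-side canonical form: Nat indices of the negatives, and the per-block positive sums.
def negsN : List Int → List Nat
  | [] => []
  | x :: xs => if x < 0 then 0 :: (negsN xs).map (· + 1) else (negsN xs).map (· + 1)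

def sumsOf (xs : List Int) : List Int :=
  ((negsN xs).zip (negsN xs).tail).map (fun p => possum ((xs.drop (p.1 + 1)).take (p.2 - (p.1 + 1))))

-- Proof-side intermediate program (two-phase scan), bridging A's fold to B's staged form.
def afterFirstNeg : List Int → Option (List Int)
  | [] => none
  | x :: xs => if x < 0 then some xs else afterFirstNeg xs

def goAlt : List Int → Int → Int → Int
  | [], _, best => best
  | x :: xs, s, best =>
    if x < 0 then goAlt xs 0 (max best s)
    else if x > 0 then goAlt xs (s + x) best
    else goAlt xs s best

def midVal (arr : List Int) : Int :=
  match afterFirstNeg arr with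
  | none => -1
  | some rest => goAlt rest 0 (-1)

-- ===== A = midVal (phase bridge for A's fold) =====
lemma seenPhase (rest : List Int) : ∀ (cs : Int) (t : List Int),
    (PySem.List.max? (rest.foldl stepA (cs, true, (-1 : Int) :: t)).2.2 (fun y => y)).getD 0
      = goAlt rest cs (t.foldl max (-1)) := by
  induction rest with
  | nil =>
    intro cs t
    simp [goAlt, PySem.List.max?_id_cons]
  | cons x xs ih =>
    intro cs t
    by_cases hneg : x < 0
    · have hpos : ¬ x > 0 := by omega
      have h := ih 0 (t ++ [cs])
      rw [List.foldl_append] at h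
      simpa [stepA, goAlt, hneg, hpos] using h
    · by_cases hpos : x > 0
      · simpa [stepA, goAlt, hneg, hpos] using ih (cs + x) t
      · simpa [stepA, goAlt, hneg, hpos] using ih cs t

lemma a_eq_mid (arr : List Int) :
    max_sum_between_two_negatives arr = midVal arr := by
  induction arr with
  | nil => simp [max_sum_between_two_negatives, midVal, afterFirstNeg, PySem.List.max?]
  | cons x xs ih =>
    by_cases hneg : x < 0
    · have hpos : ¬ x > 0 := by omega
      have h := seenPhase xs 0 []
      simp only [List.foldl_nil] at h
      simpa [max_sum_between_two_negatives, stepA, hneg, hpos, midVal, afterFirstNeg] using h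
    · by_cases hpos : x > 0 <;>
      · simp [max_sum_between_two_negatives, midVal, stepA, afterFirstNeg, hneg, hpos] at ih ⊢
        exact ih

-- ===== structural lemmas about B's staged data =====
lemma possum_nonneg (l : List Int) : 0 ≤ possum l := by
  unfold possum
  apply List.sum_nonneg
  intro x hx
  have := List.of_mem_filter hx
  simp at this
  omega

lemma possum_cons (x : Int) (l : List Int) :
    possum (x :: l) = (if 0 < x then x else 0) + possum l := by
  by_cases h : 0 < x <;> simp [possum, h]

-- consecutive-pair block sums are invariant under prepending an element and shifting all indices
lemma shift_block (x : Int) (xs : List Int) (l : List Nat) :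
    ((l.map (· + 1)).zip (l.map (· + 1)).tail).map
        (fun p => possum (((x :: xs).drop (p.1 + 1)).take (p.2 - (p.1 + 1))))
      = (l.zip l.tail).map (fun p => possum ((xs.drop (p.1 + 1)).take (p.2 - (p.1 + 1)))) := by
  rw [← List.map_tail, List.zip_map, List.map_map]
  apply List.map_congr_left
  intro p _
  simp only [Function.comp, Prod.map]
  rw [List.drop_succ_cons]
  congr 2
  omega

lemma negIdxs_eq (xs : List Int) : ∀ (s : Int),
    (((PySem.List.enumerate xs s).filter (fun p => p.2 < 0)).map (fun p => p.1))
      = (negsN xs).map (fun (n : Nat) => (n : Int) + s) := by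
  induction xs with
  | nil => intro s; simp [PySem.List.enumerate_nil, negsN]
  | cons x xs ih =>
    intro s
    have key : ∀ t : List Nat, t.map (fun (n : Nat) => (n : Int) + (s + 1))
        = (t.map (· + 1)).map (fun (n : Nat) => (n : Int) + s) := by
      intro t
      rw [List.map_map]
      apply List.map_congr_left
      intro n _
      simp only [Function.comp]
      push_cast
      ring
    rw [PySem.List.enumerate_cons, List.filter_cons]
    by_cases h : x < 0
    · have hd : (decide (x < 0)) = true := by simp [h]
      rw [hd, if_pos rfl, List.map_cons, ih (s + 1), key, List.map_map]
      rw [show negsN (x :: xs) = 0 :: (negsN xs).map (· + 1) from by simp [negsN, h],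
          List.map_cons, List.map_map]
      simp
    · have hd : (decide (x < 0)) = false := by simp [h]
      rw [hd, if_neg (by simp), ih (s + 1), key, List.map_map]
      rw [show negsN (x :: xs) = (negsN xs).map (· + 1) from by simp [negsN, h], List.map_map]

lemma sumsOf_cons_nonneg (x : Int) (xs : List Int) (h : ¬ x < 0) :
    sumsOf (x :: xs) = sumsOf xs := by
  unfold sumsOf
  rw [show negsN (x :: xs) = (negsN xs).map (· + 1) from by simp [negsN, h]]
  exact shift_block x xs (negsN xs)

lemma sumsOf_cons_neg (x : Int) (xs : List Int) (h : x < 0) :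
    sumsOf (x :: xs) = match negsN xs with
      | [] => []
      | j :: _ => possum (xs.take j) :: sumsOf xs := by
  cases hn : negsN xs with
  | nil => simp [sumsOf, negsN, h, hn]
  | cons j l =>
    unfold sumsOf
    rw [show negsN (x :: xs) = 0 :: (j :: l).map (· + 1) from by simp [negsN, h, hn]]
    simp only [List.map_cons, List.tail_cons, List.zip_cons_cons, List.map_cons]
    rw [show ((j + 1) :: l.map (· + 1)) = (j :: l).map (· + 1) from by simp,
        show (l.map (· + 1)) = ((j :: l).map (· + 1)).tail from by simp]
    rw [shift_block x xs (j :: l), hn]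
    congr 1

-- goAlt computed from the staged data
lemma goAlt_char (xs : List Int) : ∀ (s best : Int),
    goAlt xs s best = match negsN xs with
      | [] => best
      | j :: _ => (sumsOf xs).foldl max (max best (s + possum (xs.take j))) := by
  induction xs with
  | nil => intro s best; simp [goAlt, negsN]
  | cons x xs ih =>
    intro s best
    by_cases hneg : x < 0
    · have hpos : ¬ x > 0 := by omega
      rw [goAlt, if_pos hneg, ih 0 (max best s)]
      rw [show negsN (x :: xs) = 0 :: (negsN xs).map (· + 1) from by simp [negsN, hneg]]
      simp only [sumsOf_cons_neg x xs hneg]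
      cases hn : negsN xs with
      | nil => simp [possum]
      | cons j l => simp [List.foldl_cons, max_assoc, possum]
    · cases hn : negsN xs with
      | nil =>
        have hcons : negsN (x :: xs) = [] := by simp [negsN, hneg, hn]
        by_cases hpos : x > 0
        · rw [goAlt, if_neg hneg, if_pos hpos, ih (s + x) best, hn, hcons]
        · rw [goAlt, if_neg hneg, if_neg hpos, ih s best, hn, hcons]
      | cons j l =>
        have hcons : negsN (x :: xs) = (j + 1) :: l.map (· + 1) := by
          simp [negsN, hneg, hn]
        by_cases hpos : x > 0
        · rw [goAlt, if_neg hneg, if_pos hpos, ih (s + x) best, hn, hcons]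
          simp only [sumsOf_cons_nonneg x xs hneg]
          congr 1
          rw [List.take_succ_cons, possum_cons, if_pos hpos]
          omega
        · have hz : ¬ (0 : Int) < x := by omega
          rw [goAlt, if_neg hneg, if_neg hpos, ih s best, hn, hcons]
          simp only [sumsOf_cons_nonneg x xs hneg]
          congr 1
          rw [List.take_succ_cons, possum_cons, if_neg hz]
          omega

-- B computed from the staged data
lemma alt_char (arr : List Int) :
    max_sum_between_two_negatives_alt arr
      = match sumsOf arr with
        | [] => -1
        | s :: ss => ss.foldl max s := by
  unfold max_sum_between_two_negatives_alt
  rw [negIdxs_eq arr 0]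
  rw [show (negsN arr).map (fun (n : Nat) => (n : Int) + 0) = (negsN arr).map (fun (n : Nat) => (n : Int)) from
    List.map_congr_left (fun n _ => by ring)]
  by_cases hlen : ((negsN arr).map (fun (n : Nat) => (n : Int))).length < 2
  · rw [if_pos hlen]
    rw [List.length_map] at hlen
    have hs : sumsOf arr = [] := by
      cases hm : negsN arr with
      | nil => simp [sumsOf, hm]
      | cons j l =>
        cases hl : l with
        | nil => simp [sumsOf, hm, hl]
        | cons j2 l2 => rw [hm, hl] at hlen; simp at hlen
    rw [hs]
  · rw [if_neg hlen]
    rw [show ((negsN arr).map (fun (n : Nat) => (n : Int))).zip ((negsN arr).map (fun (n : Nat) => (n : Int))).tail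
          = ((negsN arr).zip (negsN arr).tail).map
              (fun p => ((p.1 : Int), (p.2 : Int))) from by
      rw [← List.map_tail, List.zip_map]; rfl]
    rw [List.map_map]
    have hb : ∀ p ∈ (negsN arr).zip (negsN arr).tail,
        ((fun p => blockSum arr p.1 p.2) ∘ fun p : Nat × Nat => ((p.1 : Int), (p.2 : Int))) p
          = possum ((arr.drop (p.1 + 1)).take (p.2 - (p.1 + 1))) := by
      intro p _
      simp only [Function.comp, blockSum]
      rw [show ((p.1 : Int) + 1) = ((p.1 + 1 : Nat) : Int) from by push_cast; ring,
          PySem.List.slice_natCast]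
    rw [List.map_congr_left hb]
    rw [show ((negsN arr).zip (negsN arr).tail).map
          (fun p => possum ((arr.drop (p.1 + 1)).take (p.2 - (p.1 + 1)))) = sumsOf arr from rfl]
    cases hsum : sumsOf arr with
    | nil =>
      exfalso
      rw [List.length_map] at hlen
      have hzl := congrArg List.length hsum
      rw [sumsOf, List.length_map, List.length_zip, List.length_tail] at hzl
      simp at hzl
      omega
    | cons a t => simp [PySem.List.max?_id_cons]

lemma mid_eq_alt (arr : List Int) : midVal arr = max_sum_between_two_negatives_alt arr := by
  induction arr with
  | nil => rw [alt_char]; simp [midVal, afterFirstNeg, sumsOf, negsN]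
  | cons x xs ih =>
    by_cases hneg : x < 0
    · have h1 : afterFirstNeg (x :: xs) = some xs := by simp [afterFirstNeg, hneg]
      have h2 : midVal (x :: xs) = goAlt xs 0 (-1) := by unfold midVal; rw [h1]
      rw [h2, goAlt_char, alt_char, sumsOf_cons_neg x xs hneg]
      cases hn : negsN xs with
      | nil => rfl
      | cons j l =>
        simp only
        congr 1
        have := possum_nonneg (xs.take j)
        omega
    · have h1 : afterFirstNeg (x :: xs) = afterFirstNeg xs := by simp [afterFirstNeg, hneg]
      have h2 : midVal (x :: xs) = midVal xs := by unfold midVal; rw [h1]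
      rw [h2, ih, alt_char, alt_char, sumsOf_cons_nonneg x xs hneg]

-- ===== VERDICT =====
theorem max_sum_between_two_negatives_spec : Claim_equal_max_sum_between_two_negatives := by
  intro arr _
  unfold Spec_max_sum_between_two_negatives
  rw [a_eq_mid, mid_eq_alt]
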